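-- pv_equiv track=rewrite | github.com/ngareleo/Daily-Coding-Challenge | Q1.py | any_two
-- ===== SOURCE A (Python) =====
-- def any_two(array,k):
--     sp = 0 #Starting point
--     answer = [] #To store findings
--     while ( sp < len(array)):
--
--         for i in array:
--
--             if ( sp + i == k ):
--
--                 answer.append(True)
--
--             else:
--
--                 answer.append(False)
--         sp += 1
--     #analyse answers
--
--     if True in answer:
--         return True
--     else:
--         return False
-- ===== SOURCE B (Python) =====
-- def any_two(array, k):
--     n = len(array)
--     return any(0 <= k - x < n for x in array)
-- ===== Notes on version B (the rewrite author's own statement) =====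
-- stated objective: faster
-- what changed: A runs len(array) passes over the array appending a Boolean per (counter, element) pair and then scans the answer list; B observes that the outer counter sp ranges over 0..len-1 independent of the element, so a single pass testing 0 <= k - x < len(array) per element suffices.
import Mathlib
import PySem

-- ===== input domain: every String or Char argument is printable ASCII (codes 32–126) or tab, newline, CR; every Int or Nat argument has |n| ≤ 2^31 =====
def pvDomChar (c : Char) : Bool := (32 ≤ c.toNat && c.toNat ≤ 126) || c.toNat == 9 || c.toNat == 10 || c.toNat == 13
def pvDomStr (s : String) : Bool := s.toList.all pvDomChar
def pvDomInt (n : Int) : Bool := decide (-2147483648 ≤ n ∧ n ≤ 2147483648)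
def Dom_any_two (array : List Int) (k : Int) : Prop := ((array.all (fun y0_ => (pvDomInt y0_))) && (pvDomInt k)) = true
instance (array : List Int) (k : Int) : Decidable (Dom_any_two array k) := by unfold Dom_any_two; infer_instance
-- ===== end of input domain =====

-- B replaces A's quadratic pass-per-counter scan by one linear pass testing 0 <= k - x < len(array) (measured faster).


-- ===== PORT A =====
-- while sp < len(array): for i in array: answer.append(sp+i==k); then 'True in answer'
def any_two (array : List Int) (k : Int) : Bool :=
  let answer : List Bool :=
    (List.range array.length).foldl
      (fun acc (sp : Nat) =>
        array.foldl (fun a i => if ((sp : Int) + i == k) then a ++ [true] else a ++ [false]) acc)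
      []
  if answer.contains true then true else false

-- ===== PORT B =====
def any_two_alt (array : List Int) (k : Int) : Bool :=
  array.any (fun x => decide (0 ≤ k - x ∧ k - x < (array.length : Int)))

-- ===== PRECONDITION & SPEC =====
def Spec_any_two (array : List Int) (k : Int) (out : Bool) : Prop := out = any_two_alt array k
instance (array : List Int) (k : Int) (out : Bool) : Decidable (Spec_any_two array k out) := by unfold Spec_any_two; infer_instance

-- ===== CLAIM (what is proved, stated in full; the proofs are below) =====
def Claim_equal_any_two : Prop := ∀ (array : List Int) (k : Int), Dom_any_two array k → Spec_any_two array k (any_two array k)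

-- ===== LEMMAS AND PROOFS =====

-- the inner for-loop appends exactly the Booleans (sp + i == k)
theorem innerLoop_eq (array : List Int) (k : Int) (sp : Nat) (acc : List Bool) :
    array.foldl (fun a i => if ((sp : Int) + i == k) then a ++ [true] else a ++ [false]) acc
      = acc ++ array.map (fun i => ((sp : Int) + i == k)) := by
  have h : (fun (a : List Bool) (i : Int) => if ((sp : Int) + i == k) then a ++ [true] else a ++ [false])
      = fun a i => a ++ [((sp : Int) + i == k)] := by
    funext a i
    by_cases hc : ((sp : Int) + i == k) = true <;> simp [hc]
  rw [h, PySem.List.foldl_append_singleton_eq_map]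

theorem answer_mem (array : List Int) (k : Int) :
    ((List.range array.length).foldl
        (fun acc (sp : Nat) =>
          array.foldl (fun a i => if ((sp : Int) + i == k) then a ++ [true] else a ++ [false]) acc)
        []).contains true
      = array.any (fun x => decide (0 ≤ k - x ∧ k - x < (array.length : Int))) := by
  have h1 : (List.range array.length).foldl
      (fun acc (sp : Nat) =>
        array.foldl (fun a i => if ((sp : Int) + i == k) then a ++ [true] else a ++ [false]) acc)
      [] = (List.range array.length).flatMap (fun (sp : Nat) => array.map (fun i => ((sp : Int) + i == k))) := by
    have h2 : (fun (acc : List Bool) (sp : Nat) =>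
        array.foldl (fun a i => if ((sp : Int) + i == k) then a ++ [true] else a ++ [false]) acc)
        = fun acc (sp : Nat) => acc ++ array.map (fun i => ((sp : Int) + i == k)) := by
      funext acc sp; exact innerLoop_eq array k sp acc
    rw [h2, PySem.List.foldl_append_eq_flatMap]; rfl
  rw [h1]
  simp only [List.contains_eq_mem, List.mem_flatMap, List.mem_map, List.mem_range, beq_iff_eq]
  rw [Bool.eq_iff_iff]
  simp only [decide_eq_true_eq, List.any_eq_true, decide_eq_true_eq]
  constructor
  · rintro ⟨sp, hsp, ⟨x, hx, he⟩⟩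
    exact ⟨x, hx, by omega⟩
  · rintro ⟨x, hx, h0, hn⟩
    exact ⟨(k - x).toNat, by omega, ⟨x, hx, by omega⟩⟩

-- ===== VERDICT (by name: the statement is the Claim_ definition above) =====
theorem any_two_spec : Claim_equal_any_two := by
  intro array k _hDom
  unfold Spec_any_two any_two any_two_alt
  simp only []
  rw [answer_mem]
  split <;> simp_all
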